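-- pv_equiv track=rewrite | github.com/isehgu/ansible | ansible_app/roles/core/filter_plugins/gts.py | gtsOpconResultCount
-- ===== SOURCE A (Python) =====
-- def gtsOpconResultCount(output_list):
--     """ Count the number of lines after ======= from opcon output """
--     result_count = 0
--     separator = 0
--     for line in output_list:
--         if '========' in line:
--             separator = 1
--             continue
--
--         if 'Last login' in line:
--             continue
--
--         if separator:
--             result_count += 1
--
--     return result_count
-- ===== SOURCE B (Python) =====
-- def gtsOpconResultCount(output_list):
--     """ Count the number of lines after ======= from opcon output """
--     sep_idx = None
--     for i, line in enumerate(output_list):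
--         if '========' in line:
--             sep_idx = i
--             break
--     if sep_idx is None:
--         return 0
--     count = 0
--     for line in output_list[sep_idx + 1:]:
--         if '========' in line or 'Last login' in line:
--             continue
--         count += 1
--     return count
-- ===== Notes on version B (the rewrite author's own statement) =====
-- stated objective: simpler
-- what changed: Replaced the stateful separator flag carried through one loop by a two-phase structure: first locate the index of the first '========' line (returning 0 if none), then count the non-'========', non-'Last login' lines in the slice after it.
import Mathlib
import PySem

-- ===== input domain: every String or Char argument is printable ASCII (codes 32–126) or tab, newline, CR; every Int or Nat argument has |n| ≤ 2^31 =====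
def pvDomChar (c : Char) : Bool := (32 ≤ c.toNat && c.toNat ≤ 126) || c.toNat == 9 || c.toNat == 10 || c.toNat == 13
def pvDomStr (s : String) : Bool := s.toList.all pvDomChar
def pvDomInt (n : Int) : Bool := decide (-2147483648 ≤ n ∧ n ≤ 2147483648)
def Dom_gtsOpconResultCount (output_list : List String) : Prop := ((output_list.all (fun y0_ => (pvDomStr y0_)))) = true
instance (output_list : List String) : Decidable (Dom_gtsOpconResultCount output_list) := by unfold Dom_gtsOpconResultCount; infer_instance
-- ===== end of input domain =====

-- B replaces A's stateful separator flag by a locate-then-count two-phase structure (objective: simpler).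


-- ===== PORT A =====
-- one loop, state (result_count, separator); 'if separator:' is separator ≠ 0
def gtsOpconResultCount (output_list : List String) : Int :=
  (output_list.foldl (fun (st : Int × Int) line =>
    if PySem.Str.isIn "========" line then (st.1, 1)
    else if PySem.Str.isIn "Last login" line then st
    else if st.2 ≠ 0 then (st.1 + 1, st.2)
    else st) (0, 0)).1

-- ===== PORT B =====
-- phase 1: index of the first separator line (enumerate + break)
def gtsFindSep : List String → Option Nat
  | [] => none
  | l :: rest =>
    if PySem.Str.isIn "========" l then some 0
    else (gtsFindSep rest).map (· + 1)

def gtsOpconResultCount_alt (output_list : List String) : Int :=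
  match gtsFindSep output_list with
  | none => 0
  | some idx =>
    -- phase 2: count over the slice output_list[idx+1:]
    (output_list.drop (idx + 1)).foldl (fun (c : Int) line =>
      if PySem.Str.isIn "========" line || PySem.Str.isIn "Last login" line then c
      else c + 1) 0

-- ===== PRECONDITION & SPEC =====
def Spec_gtsOpconResultCount (output_list : List String) (out : Int) : Prop := out = gtsOpconResultCount_alt output_list
instance (output_list : List String) (out : Int) : Decidable (Spec_gtsOpconResultCount output_list out) := by unfold Spec_gtsOpconResultCount; infer_instance

-- ===== CLAIM (what is proved, stated in full; the proofs are below) =====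
def Claim_equal_gtsOpconResultCount : Prop := ∀ (output_list : List String), Dom_gtsOpconResultCount output_list → Spec_gtsOpconResultCount output_list (gtsOpconResultCount output_list)

-- ===== LEMMAS AND PROOFS =====

-- A's step function, named for the lemmas
def gtsStepA (st : Int × Int) (line : String) : Int × Int :=
  if PySem.Str.isIn "========" line then (st.1, 1)
  else if PySem.Str.isIn "Last login" line then st
  else if st.2 ≠ 0 then (st.1 + 1, st.2)
  else st

-- B's counting step
def gtsStepB (c : Int) (line : String) : Int :=
  if PySem.Str.isIn "========" line || PySem.Str.isIn "Last login" line then c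
  else c + 1

lemma gtsA_eq_foldl_stepA (xs : List String) :
    gtsOpconResultCount xs = (xs.foldl gtsStepA (0, 0)).1 := rfl

-- with separator already set, A counts exactly as B does
lemma gtsA_sep_set (xs : List String) (c : Int) :
    (xs.foldl gtsStepA (c, 1)).1 = xs.foldl gtsStepB c := by
  induction xs generalizing c with
  | nil => rfl
  | cons l rest ih =>
    rw [List.foldl_cons, List.foldl_cons]
    unfold gtsStepA gtsStepB
    by_cases h1 : PySem.Str.isIn "========" l = true
    · rw [if_pos h1, if_pos (by rw [h1, Bool.true_or])]
      exact ih c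
    · by_cases h2 : PySem.Str.isIn "Last login" l = true
      · rw [if_neg h1, if_pos h2,
            if_pos (by rw [h2, Bool.or_true])]
        exact ih c
      · rw [if_neg h1, if_neg h2, if_pos (show ((c, (1:Int)).2 ≠ 0) by norm_num),
            if_neg (by rw [Bool.not_eq_true] at h1 h2; rw [h1, h2]; simp)]
        exact ih (c + 1)

-- no separator anywhere: A never counts
lemma gtsA_no_sep (xs : List String) (c : Int) (h : gtsFindSep xs = none) :
    (xs.foldl gtsStepA (c, 0)).1 = c := by
  induction xs generalizing c with
  | nil => rfl
  | cons l rest ih =>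
    by_cases h1 : PySem.Str.isIn "========" l = true
    · rw [gtsFindSep, if_pos h1] at h; exact absurd h (by simp)
    · rw [gtsFindSep, if_neg h1, Option.map_eq_none_iff] at h
      rw [List.foldl_cons]
      unfold gtsStepA
      rw [if_neg h1]
      by_cases h2 : PySem.Str.isIn "Last login" l = true
      · rw [if_pos h2]; exact ih _ h
      · rw [if_neg h2, if_neg (by norm_num)]; exact ih _ h

-- separator at index idx: A's count is B's count over the tail after idx
lemma gtsA_sep_at (xs : List String) (c : Int) (idx : Nat)
    (h : gtsFindSep xs = some idx) :
    (xs.foldl gtsStepA (c, 0)).1 = (xs.drop (idx + 1)).foldl gtsStepB c := by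
  induction xs generalizing c idx with
  | nil => simp [gtsFindSep] at h
  | cons l rest ih =>
    by_cases h1 : PySem.Str.isIn "========" l = true
    · rw [gtsFindSep, if_pos h1] at h
      cases h
      rw [List.foldl_cons]
      unfold gtsStepA
      rw [if_pos h1, List.drop_succ_cons, List.drop_zero]
      exact gtsA_sep_set rest c
    · rw [gtsFindSep, if_neg h1] at h
      cases hr : gtsFindSep rest with
      | none => rw [hr] at h; simp at h
      | some i =>
        rw [hr] at h
        simp only [Option.map_some, Option.some.injEq] at h
        subst h
        rw [List.foldl_cons, List.drop_succ_cons]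
        unfold gtsStepA
        rw [if_neg h1]
        by_cases h2 : PySem.Str.isIn "Last login" l = true
        · rw [if_pos h2]; exact ih _ _ hr
        · rw [if_neg h2, if_neg (by norm_num)]; exact ih _ _ hr

-- ===== VERDICT (by name: the statement is the Claim_ definition above) =====
theorem gtsOpconResultCount_spec : Claim_equal_gtsOpconResultCount := by
  intro xs _
  unfold Spec_gtsOpconResultCount gtsOpconResultCount_alt
  rw [gtsA_eq_foldl_stepA]
  cases h : gtsFindSep xs with
  | none => exact gtsA_no_sep xs 0 h
  | some idx => exact gtsA_sep_at xs 0 idx h
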